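-- pv_equiv track=rewrite | github.com/dataiku/dss-plugin-timeseries-preparation | python-lib/dku_timeseries/decomposition.py | get_component_names
-- ===== SOURCE A (Python) =====
-- def get_component_names(target_column, columns):
--     new_columns_names = {}
--     for component_type in ["trend", "seasonal", "residuals"]:
--         new_column_name = f"{target_column}_{component_type}"
--         if new_column_name not in columns:
--             new_columns_names[component_type] = new_column_name
--         else:
--             new_columns_names[component_type] = prevent_collision(new_column_name,columns, 0)
--     return new_columns_names
--
-- def prevent_collision(new_column_name,columns, suffix):
--     if f"{new_column_name}_{suffix}" not in columns:
--         return f"{new_column_name}_{suffix}"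
--     else:
--         suffix += 1
--         return prevent_collision(new_column_name, columns, suffix)
-- ===== SOURCE B (Python) =====
-- def get_component_names(target_column, columns):
--     def fresh_name(base):
--         if base not in columns:
--             return base
--         # among the len(columns)+1 candidates base_0 .. base_len at least one
--         # is absent from columns, so this generator always yields
--         return next(f"{base}_{i}" for i in range(len(columns) + 1)
--                     if f"{base}_{i}" not in columns)
--     return {ct: fresh_name(f"{target_column}_{ct}")
--             for ct in ["trend", "seasonal", "residuals"]}
-- ===== Notes on version B (the rewrite author's own statement) =====
-- stated objective: simpler
-- what changed: Replaced the recursive prevent_collision helper and explicit dict mutation with a dict comprehension whose value is the first free candidate drawn from a bounded range(len(columns)+1) search (pigeonhole guarantees one exists), eliminating the unbounded recursion.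
import Mathlib
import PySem

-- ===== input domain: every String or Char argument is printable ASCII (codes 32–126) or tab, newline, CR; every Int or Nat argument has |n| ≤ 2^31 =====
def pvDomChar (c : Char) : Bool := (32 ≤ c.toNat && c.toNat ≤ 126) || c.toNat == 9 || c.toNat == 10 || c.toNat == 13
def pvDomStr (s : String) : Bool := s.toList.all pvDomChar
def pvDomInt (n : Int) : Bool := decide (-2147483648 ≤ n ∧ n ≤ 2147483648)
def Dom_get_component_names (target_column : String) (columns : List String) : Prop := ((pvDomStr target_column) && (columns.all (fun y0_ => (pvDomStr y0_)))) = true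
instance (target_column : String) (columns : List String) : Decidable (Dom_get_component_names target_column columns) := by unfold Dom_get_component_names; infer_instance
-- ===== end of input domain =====

-- B replaces A's recursive prevent_collision helper and dict mutation by a dict comprehension
-- whose value is the first free candidate of a bounded range search (objective: simpler).

-- ===== PORT A =====
-- fuel only totalizes the recursion and is never exhausted: the call site passes
-- columns.length + 1 and a free suffix always exists within that many steps.
def prevent_collision (new_column_name : String) (columns : List String) : Nat → Nat → String
  | suffix, fuel =>
    if (new_column_name ++ "_" ++ PySem.Int.toStr (Int.ofNat suffix)) ∉ columns then
      new_column_name ++ "_" ++ PySem.Int.toStr (Int.ofNat suffix)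
    else
      match fuel with
      | 0 => new_column_name ++ "_" ++ PySem.Int.toStr (Int.ofNat suffix)  -- unreachable
      | f + 1 => prevent_collision new_column_name columns (suffix + 1) f

def get_component_names (target_column : String) (columns : List String) : List (String × String) :=
  (["trend", "seasonal", "residuals"].foldl
    (fun new_columns_names component_type =>
      let new_column_name := target_column ++ "_" ++ component_type
      if new_column_name ∉ columns then
        PySem.Dict.insert new_columns_names component_type new_column_name
      else
        PySem.Dict.insert new_columns_names component_type
          (prevent_collision new_column_name columns 0 (columns.length + 1)))
    (PySem.Dict.mk ([] : List (String × String)))).items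

-- ===== PORT B =====
def fresh_name (base : String) (columns : List String) : String :=
  if base ∉ columns then base
  else
    match (PySem.List.pyRange 0 ((columns.length : Int) + 1) 1).find?
        (fun i => decide ((base ++ "_" ++ PySem.Int.toStr i) ∉ columns)) with
    | some i => base ++ "_" ++ PySem.Int.toStr i
    | none => base  -- unreachable: some suffix in the range is always free

def get_component_names_alt (target_column : String) (columns : List String) : List (String × String) :=
  ["trend", "seasonal", "residuals"].map
    (fun ct => (ct, fresh_name (target_column ++ "_" ++ ct) columns))

-- ===== PRECONDITION & SPEC =====
def Spec_get_component_names (target_column : String) (columns : List String) (out : List (String × String)) : Prop := out = get_component_names_alt target_column columns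
instance (target_column : String) (columns : List String) (out : List (String × String)) : Decidable (Spec_get_component_names target_column columns out) := by unfold Spec_get_component_names; infer_instance

-- ===== CLAIM (what is proved, stated in full; the proofs are below) =====
def Claim_equal_get_component_names : Prop := ∀ (target_column : String) (columns : List String), Dom_get_component_names target_column columns → Spec_get_component_names target_column columns (get_component_names target_column columns)

-- ===== LEMMAS AND PROOFS =====

theorem digitChar_inj (a b : Nat) (ha : a < 10) (hb : b < 10)
    (h : Nat.digitChar a = Nat.digitChar b) : a = b := by
  interval_cases a <;> interval_cases b <;> simp_all [Nat.digitChar]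

theorem nat_repr_inj : ∀ m n : Nat, Nat.repr m = Nat.repr n → m = n := by
  intro m
  induction m using Nat.strong_induction_on with
  | _ m ih =>
    intro n h
    by_cases hm : m < 10 <;> by_cases hn : n < 10
    · rw [Nat.repr_of_lt hm, Nat.repr_of_lt hn] at h
      have h2 := congrArg String.toList h
      simp [String.toList_singleton] at h2
      exact digitChar_inj _ _ hm hn h2
    · exfalso
      have h1 := congrArg String.length h
      rw [Nat.repr_of_lt hm, Nat.repr_of_ge (le_of_not_gt hn)] at h1
      rw [String.length_append] at h1
      simp at h1
      have hp := @Nat.length_repr_pos (n / 10)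
      rw [h1] at hp
      simp at hp
    · exfalso
      have h1 := congrArg String.length h
      rw [Nat.repr_of_ge (le_of_not_gt hm), Nat.repr_of_lt hn] at h1
      rw [String.length_append] at h1
      simp at h1
      have hp := @Nat.length_repr_pos (m / 10)
      rw [h1] at hp
      simp at hp
    · rw [Nat.repr_of_ge (le_of_not_gt hm), Nat.repr_of_ge (le_of_not_gt hn)] at h
      have h2 := congrArg String.toList h
      rw [String.toList_append, String.toList_append, String.toList_singleton,
        String.toList_singleton] at h2
      obtain ⟨h3, h4⟩ := List.append_inj' h2 (by simp)
      have hdiv : m / 10 = n / 10 := by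
        apply ih (m / 10) (by omega)
        have h5 := congrArg String.ofList h3
        simpa [String.ofList_toList] using h5
      have hmod : m % 10 = n % 10 := by
        have h6 : (m % 10).digitChar = (n % 10).digitChar := by simpa using h4
        exact digitChar_inj _ _ (Nat.mod_lt _ (by omega)) (Nat.mod_lt _ (by omega)) h6
      omega

theorem toStr_natCast (k : Nat) : PySem.Int.toStr ((k : Nat) : Int) = Nat.repr k := by
  rw [PySem.Int.toStr, PySem.Int.toChars, if_neg (by omega), Nat.repr_eq_ofList_toDigits]
  simp

theorem cand_inj (base : String) (a b : Nat)
    (h : base ++ "_" ++ PySem.Int.toStr (Int.ofNat a)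
       = base ++ "_" ++ PySem.Int.toStr (Int.ofNat b)) : a = b := by
  have h1 := congrArg String.toList h
  simp only [String.toList_append, List.append_assoc] at h1
  have h2 := List.append_cancel_left h1
  have h3 := List.append_cancel_left h2
  have h4 : PySem.Int.toStr (Int.ofNat a) = PySem.Int.toStr (Int.ofNat b) := by
    have h5 := congrArg String.ofList h3
    simpa [String.ofList_toList] using h5
  rw [Int.ofNat_eq_natCast, Int.ofNat_eq_natCast, toStr_natCast, toStr_natCast] at h4
  exact nat_repr_inj _ _ h4

theorem exists_free (base : String) (columns : List String) :
    ∃ k, k ≤ columns.length ∧ (base ++ "_" ++ PySem.Int.toStr (Int.ofNat k)) ∉ columns := by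
  by_contra hcon
  push_neg at hcon
  have hsub : (List.range (columns.length + 1)).map
      (fun k => base ++ "_" ++ PySem.Int.toStr (Int.ofNat k)) ⊆ columns := by
    intro x hx
    simp only [List.mem_map, List.mem_range] at hx
    obtain ⟨k, hk, rfl⟩ := hx
    exact hcon k (by omega)
  have hnodup : ((List.range (columns.length + 1)).map
      (fun k => base ++ "_" ++ PySem.Int.toStr (Int.ofNat k))).Nodup :=
    List.Nodup.map (fun a b hab => cand_inj base a b hab) List.nodup_range
  have hcard : ((List.range (columns.length + 1)).map
      (fun k => base ++ "_" ++ PySem.Int.toStr (Int.ofNat k))).toFinset.card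
      = columns.length + 1 := by
    rw [List.toFinset_card_of_nodup hnodup]; simp
  have hle := Finset.card_le_card (fun x hx => by
        simp only [List.mem_toFinset] at *
        exact hsub hx :
      ((List.range (columns.length + 1)).map
        (fun k => base ++ "_" ++ PySem.Int.toStr (Int.ofNat k))).toFinset ⊆ columns.toFinset)
  have hlen := List.toFinset_card_le columns
  omega

theorem find?_range_least (n j : Nat) (q : Nat → Bool) (hjn : j < n) (hq : q j = true)
    (hmin : ∀ k, k < j → q k = false) : (List.range n).find? q = some j := by
  obtain ⟨m, rfl⟩ : ∃ m, n = j + (m + 1) := ⟨n - j - 1, by omega⟩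
  rw [List.range_add, List.find?_append]
  have h1 : (List.range j).find? q = none := by
    rw [List.find?_eq_none]
    intro x hx
    simp only [List.mem_range] at hx
    simp [hmin x hx]
  rw [h1, List.range_succ_eq_map, List.map_cons]
  simp [List.find?, hq]

theorem prevent_eq_least (base : String) (columns : List String) (j : Nat)
    (hq : (base ++ "_" ++ PySem.Int.toStr (Int.ofNat j)) ∉ columns)
    (hmin : ∀ k, k < j → (base ++ "_" ++ PySem.Int.toStr (Int.ofNat k)) ∈ columns) :
    ∀ fuel s, s ≤ j → j ≤ s + fuel →
      prevent_collision base columns s fuel = base ++ "_" ++ PySem.Int.toStr (Int.ofNat j) := by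
  intro fuel
  induction fuel with
  | zero =>
    intro s h1 h2
    have hs : s = j := by omega
    subst hs
    rw [prevent_collision, if_pos hq]
  | succ f ihf =>
    intro s h1 h2
    rw [prevent_collision]
    by_cases hs : (base ++ "_" ++ PySem.Int.toStr (Int.ofNat s)) ∈ columns
    · rw [if_neg (not_not_intro hs)]
      have hsj : s ≠ j := fun h => hq (h ▸ hs)
      exact ihf (s + 1) (by omega) (by omega)
    · have hsj : s = j := by
        by_contra hne
        exact hs (hmin s (by omega))
      subst hsj
      rw [if_pos hs]

theorem fresh_eq_prevent (base : String) (columns : List String) :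
    (if base ∉ columns then base
     else prevent_collision base columns 0 (columns.length + 1)) = fresh_name base columns := by
  rw [fresh_name]
  by_cases hb : base ∈ columns
  · rw [if_neg (not_not_intro hb), if_neg (not_not_intro hb)]
    obtain ⟨w, hw, hwq⟩ := exists_free base columns
    have hex : ∃ k, (base ++ "_" ++ PySem.Int.toStr (Int.ofNat k)) ∉ columns := ⟨w, hwq⟩
    have hqj : (base ++ "_" ++ PySem.Int.toStr (Int.ofNat (Nat.find hex))) ∉ columns :=
      Nat.find_spec hex
    have hminj : ∀ k, k < Nat.find hex →
        (base ++ "_" ++ PySem.Int.toStr (Int.ofNat k)) ∈ columns := by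
      intro k hk
      have := Nat.find_min hex hk
      simpa using this
    have hjle : Nat.find hex ≤ columns.length := le_trans (Nat.find_min' hex hwq) hw
    have hrange : PySem.List.pyRange 0 ((columns.length : Int) + 1) 1
        = (List.range (columns.length + 1)).map (fun k : Nat => ((0 : Int) + (k : Int))) := by
      rw [PySem.List.pyRange_one]
      have h0 : ((columns.length : Int) + 1 - 0).toNat = columns.length + 1 := by omega
      rw [h0]
    rw [hrange, List.find?_map]
    have hfind : (List.range (columns.length + 1)).find?
        ((fun i => decide ((base ++ "_" ++ PySem.Int.toStr i) ∉ columns)) ∘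
          (fun k : Nat => ((0 : Int) + (k : Int)))) = some (Nat.find hex) := by
      apply find?_range_least _ _ _ (by omega)
      · simp only [Function.comp]
        simpa using hqj
      · intro k hk
        simp only [Function.comp]
        have := hminj k hk
        simpa using this
    rw [hfind]
    simp only [Option.map_some]
    rw [prevent_eq_least base columns (Nat.find hex) hqj hminj (columns.length + 1) 0
      (by omega) (by omega)]
    norm_num
  · rw [if_pos hb, if_pos hb]

-- ===== VERDICT (by name: the statement is the Claim_ definition above) =====
theorem get_component_names_spec : Claim_equal_get_component_names := by
  intro target_column columns _
  unfold Spec_get_component_names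
  have E : ∀ (d : PySem.Dict String String) (ct : String),
      (if (target_column ++ "_" ++ ct) ∉ columns then
        PySem.Dict.insert d ct (target_column ++ "_" ++ ct)
      else
        PySem.Dict.insert d ct
          (prevent_collision (target_column ++ "_" ++ ct) columns 0 (columns.length + 1)))
      = PySem.Dict.insert d ct (fresh_name (target_column ++ "_" ++ ct) columns) := by
    intro d ct
    rw [← apply_ite (PySem.Dict.insert d ct), fresh_eq_prevent]
  unfold get_component_names get_component_names_alt
  simp only [List.foldl_cons, List.foldl_nil, List.map_cons, List.map_nil, E]
  simp [PySem.Dict.insert, PySem.Dict.contains]
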